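-- pv_equiv track=rewrite | github.com/Gae797/Deep-Comedy | TextGenerator.py | postProcessLines
-- ===== SOURCE A (Python) =====
-- def postProcessLine(line):
--
--     new_line = line.replace("SLA ","").replace(" ELA","").replace("SLB ","").replace(" ELB","").replace("SLC ","").replace(" ELC","")
--     new_line = new_line[0].upper() + new_line[1:] + "."
--
--     return new_line
--
-- def postProcessLines(lines):
--
--     new_lines = []
--     counter=1
--     for line in lines:
--         new_lines.append(postProcessLine(line))
--         if counter%3==0:
--             new_lines.append("\n")
--         counter+=1
--
--     return new_lines
-- ===== SOURCE B (Python) =====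
-- TOKENS = ("SLA ", " ELA", "SLB ", " ELB", "SLC ", " ELC")
--
--
-- def _transform(line):
--     s = line
--     for tok in TOKENS:
--         s = s.replace(tok, "")
--     return s[0].upper() + s[1:] + "."
--
--
-- def postProcessLines(lines):
--     processed = [_transform(line) for line in lines]
--     out = []
--     for i in range(0, len(processed), 3):
--         chunk = processed[i:i + 3]
--         out.extend(chunk)
--         if len(chunk) == 3:
--             out.append("\n")
--     return out
-- ===== Notes on version B (the rewrite author's own statement) =====
-- stated objective: alternative
-- what changed: B replaces A's single counter-gated loop by two differently-shaped passes: first map the per-line transform (token-removal loop over a TOKENS tuple, capitalize, append '.') over all lines, then group the processed list with an indexed range(0, n, 3) pass that extends the output with each 3-element slice and appends '\n' after each full chunk.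
import Mathlib
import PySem

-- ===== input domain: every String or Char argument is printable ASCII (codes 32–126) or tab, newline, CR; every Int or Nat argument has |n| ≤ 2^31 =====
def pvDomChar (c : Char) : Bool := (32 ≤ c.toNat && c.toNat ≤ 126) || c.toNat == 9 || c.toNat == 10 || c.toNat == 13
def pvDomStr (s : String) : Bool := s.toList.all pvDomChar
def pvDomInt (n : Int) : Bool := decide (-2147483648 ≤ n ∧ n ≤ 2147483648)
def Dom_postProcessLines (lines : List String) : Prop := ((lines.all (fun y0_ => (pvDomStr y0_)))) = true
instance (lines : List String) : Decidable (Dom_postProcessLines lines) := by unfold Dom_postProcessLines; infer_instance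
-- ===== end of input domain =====

-- B replaces A's single counter-gated loop by two passes: map the per-line transform over all
-- lines, then group the processed list with an indexed range(0, n, 3) pass, appending "\n"
-- after each full 3-chunk (objective: alternative decomposition, same cost).

-- ===== PORT A =====
-- postProcessLine: the six chained replaces, then new_line[0].upper() + new_line[1:] + "."
-- (new_line[0] raises IndexError on an empty string: that case is excluded by Pre_; the
-- port returns "" there, nothing is claimed about it)
def pplA_line (line : String) : String :=
  let s := PySem.Str.replace (PySem.Str.replace (PySem.Str.replace (PySem.Str.replace
             (PySem.Str.replace (PySem.Str.replace line "SLA " "") " ELA" "") "SLB " "")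
             " ELB" "") "SLC " "") " ELC" ""
  match PySem.Str.pyGet? s 0 with
  | some c => PySem.Str.upper (String.ofList [c]) ++ PySem.Str.slice s (some 1) none ++ "."
  | none => ""

-- the for loop with its counter (counter % 3 == 0 appends "\n")
def pplA_loop : List String → Int → List String
  | [], _ => []
  | l :: ls, c =>
      pplA_line l :: ((if PySem.Int.mod c 3 == 0 then ["\n"] else []) ++ pplA_loop ls (c + 1))

def postProcessLines (lines : List String) : List String :=
  pplA_loop lines 1

-- ===== PORT B =====
-- _transform: token-removal loop over TOKENS, then s[0].upper() + s[1:] + "."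
-- (s[0] raises IndexError on an empty string, exactly as A does: excluded by Pre_)
def pplB_line (line : String) : String :=
  let s := (["SLA ", " ELA", "SLB ", " ELB", "SLC ", " ELC"] : List String).foldl
             (fun acc t => PySem.Str.replace acc t "") line
  match PySem.Str.pyGet? s 0 with
  | some c => PySem.Str.upper (String.ofList [c]) ++ PySem.Str.slice s (some 1) none ++ "."
  | none => ""

-- the indexed pass: for i in range(0, len(processed), 3) extend with processed[i:i+3],
-- "\n" after each full chunk
def pplB_chunks (ps : List String) : List String :=
  (PySem.List.pyRange 0 (ps.length : Int) 3).foldl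
    (fun out i =>
      let chunk := PySem.List.slice ps (some i) (some (i + 3))
      out ++ chunk ++ (if chunk.length == 3 then ["\n"] else []))
    []

def postProcessLines_alt (lines : List String) : List String :=
  pplB_chunks (lines.map pplB_line)

-- ===== PRECONDITION & SPEC =====
-- Pre_ excludes exactly the inputs on which A raises IndexError: those containing a line that
-- becomes empty after removing the six tokens (new_line[0] on "").
def Pre_postProcessLines (lines : List String) : Prop :=
  ∀ line ∈ lines,
    PySem.Str.replace (PySem.Str.replace (PySem.Str.replace (PySem.Str.replace
      (PySem.Str.replace (PySem.Str.replace line "SLA " "") " ELA" "") "SLB " "")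
      " ELB" "") "SLC " "") " ELC" "" ≠ ""
instance (lines : List String) : Decidable (Pre_postProcessLines lines) := by
  unfold Pre_postProcessLines; infer_instance

def pvWitness_postProcessLines : List String :=
  ["SLA nel mezzo ELA", "del cammin", "di nostra vita", "mi ritrovai"]

def Spec_postProcessLines (lines : List String) (out : List String) : Prop :=
  out = postProcessLines_alt lines
instance (lines : List String) (out : List String) : Decidable (Spec_postProcessLines lines out) := by
  unfold Spec_postProcessLines; infer_instance

-- ===== CLAIM (what is proved, stated in full; the proofs are below) =====
def Claim_equal_postProcessLines : Prop :=
  ∀ (lines : List String), Dom_postProcessLines lines → Pre_postProcessLines lines →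
    Spec_postProcessLines lines (postProcessLines lines)

-- ===== LEMMAS AND PROOFS =====

-- the two per-line transforms are the same computation once B's token fold unfolds to A's chain
theorem line_eq : pplA_line = pplB_line := by
  funext line
  unfold pplA_line pplB_line
  simp only [List.foldl]

-- the counter only matters modulo 3
theorem loopA_shift (ls : List String) : ∀ c, pplA_loop ls (c + 3) = pplA_loop ls c := by
  induction ls with
  | nil => intro c; rfl
  | cons l ls ih =>
      intro c
      have h1 : PySem.Int.mod (c + 3) 3 = PySem.Int.mod c 3 := by
        unfold PySem.Int.mod; rw [Int.add_comm, Int.add_fmod_left]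
      have h2 : c + 3 + 1 = (c + 1) + 3 := by ring
      simp only [pplA_loop, h1, h2, ih]

-- reference chunking
def chunkRef : List String → List String
  | a :: b :: c :: rest => a :: b :: c :: "\n" :: chunkRef rest
  | xs => xs

theorem loopA_char (ls : List String) : pplA_loop ls 1 = chunkRef (ls.map pplA_line) := by
  have g1 : (PySem.Int.mod 1 3 == 0) = false := by decide
  have g2 : (PySem.Int.mod (1 + 1) 3 == 0) = false := by decide
  have g3 : (PySem.Int.mod (1 + 1 + 1) 3 == 0) = true := by decide
  match ls with
  | [] => rfl
  | [a] => simp only [pplA_loop, g1, List.map, chunkRef]; rfl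
  | [a, b] => simp only [pplA_loop, g1, g2, List.map, chunkRef]; rfl
  | a :: b :: c :: rest =>
      have ih := loopA_char rest
      simp only [pplA_loop, g1, g2, g3, List.map, chunkRef, Bool.false_eq_true, if_false,
        if_true, List.nil_append, List.singleton_append]
      rw [show (1 : Int) + 1 + 1 + 1 = 1 + 3 from by ring, loopA_shift, ih]
  termination_by ls.length

-- a step-3 range peels its first index
theorem pyRange3_cons (a b : Int) (h : a < b) :
    PySem.List.pyRange a b 3 = a :: PySem.List.pyRange (a + 3) b 3 := by
  rw [PySem.List.pyRange_of_pos a b (by omega : (0:Int) < 3),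
      PySem.List.pyRange_of_pos (a + 3) b (by omega : (0:Int) < 3), if_pos h]
  by_cases h3 : a + 3 < b
  · rw [if_pos h3]
    have hn : ((b - a + 3 - 1) / 3).toNat = ((b - (a + 3) + 3 - 1) / 3).toNat + 1 := by omega
    rw [hn, List.range_succ_eq_map, List.map_cons, List.map_map]
    congr 1
    · norm_num
    · exact List.map_congr_left fun k _ => by simp [Function.comp]; ring
  · rw [if_neg h3]
    have hn : ((b - a + 3 - 1) / 3).toNat = 1 := by omega
    rw [hn]
    simp

-- B's indexed fold, started at any index k, appends the chunking of the k-th tail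
theorem chunk_loop (ps : List String) (k : Nat) (acc : List String) :
    (PySem.List.pyRange (k : Int) (ps.length : Int) 3).foldl
      (fun out i =>
        let chunk := PySem.List.slice ps (some i) (some (i + 3))
        out ++ chunk ++ (if chunk.length == 3 then ["\n"] else []))
      acc
    = acc ++ chunkRef (ps.drop k) := by
  by_cases hk : k < ps.length
  · rw [pyRange3_cons (k : Int) (ps.length : Int) (by exact_mod_cast hk), List.foldl_cons]
    rw [show ((k : Int) + 3) = ((k + 3 : Nat) : Int) from by push_cast; ring]
    rw [chunk_loop ps (k + 3)]
    have hs : PySem.List.slice ps (some (k : Int)) (some ((k + 3 : Nat) : Int))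
        = (ps.drop k).take 3 := by
      rw [PySem.List.slice_natCast]
      congr 1
      omega
    have hdd : ps.drop (k + 3) = (ps.drop k).drop 3 := by
      rw [List.drop_drop, Nat.add_comm]
    simp only [hs, hdd]
    have hne : ps.drop k ≠ [] := by
      simp [List.drop_eq_nil_iff]
      omega
    match hd : ps.drop k with
    | [] => exact absurd hd hne
    | [a] => simp [chunkRef]
    | [a, b] => simp [chunkRef]
    | a :: b :: c :: rest => simp [chunkRef]
  · rw [PySem.List.pyRange_of_pos _ _ (by omega : (0:Int) < 3),
        if_neg (by exact_mod_cast hk), List.range_zero, List.map_nil, List.foldl_nil,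
        List.drop_eq_nil_of_le (by omega)]
    simp [chunkRef]
  termination_by ps.length - k

theorem chunksB_char (ps : List String) : pplB_chunks ps = chunkRef ps := by
  have h := chunk_loop ps 0 []
  simpa [pplB_chunks] using h

-- ===== VERDICT (by name: the statement is the Claim_ definition above) =====
theorem postProcessLines_spec : Claim_equal_postProcessLines := by
  intro lines _ hpre
  unfold Spec_postProcessLines postProcessLines postProcessLines_alt
  rw [loopA_char, chunksB_char, line_eq]
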